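-- pv_equiv track=rewrite | github.com/Mayurgohane/Python-Practice | python_practice.py | count_even_odd
-- ===== SOURCE A (Python) =====
-- def count_even_odd(text):
--   even_count = 0
--   odd_count = 0
--   for char in text:
--     if char.isdigit():
--       num = int(char)
--       if num % 2 == 0:
--         even_count += 1
--       else:
--         odd_count += 1
--   return even_count, odd_count
-- ===== SOURCE B (Python) =====
-- def count_even_odd(text):
--     counts = {}
--     for ch in text:
--         counts[ch] = counts.get(ch, 0) + 1
--     even_count = sum(counts.get(d, 0) for d in '02468')
--     odd_count = sum(counts.get(d, 0) for d in '13579')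
--     return even_count, odd_count
-- ===== Notes on version B (the rewrite author's own statement) =====
-- stated objective: alternative
-- what changed: B first builds a character frequency table in one pass and then aggregates the even-digit and odd-digit counts over the two fixed groups of digit keys, instead of A's per-character parity branching with two running counters.
import Mathlib
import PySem

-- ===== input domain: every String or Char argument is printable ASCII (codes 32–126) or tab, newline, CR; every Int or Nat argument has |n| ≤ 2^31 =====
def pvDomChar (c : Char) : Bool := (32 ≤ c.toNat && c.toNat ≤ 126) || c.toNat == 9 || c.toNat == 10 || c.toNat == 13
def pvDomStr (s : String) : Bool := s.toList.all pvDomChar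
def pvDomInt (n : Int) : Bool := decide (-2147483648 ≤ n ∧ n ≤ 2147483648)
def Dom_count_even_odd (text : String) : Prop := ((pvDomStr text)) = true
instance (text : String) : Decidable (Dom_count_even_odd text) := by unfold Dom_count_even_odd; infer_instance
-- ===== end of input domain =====

-- B replaces A's per-character parity branching by a one-pass frequency table
-- followed by a fixed aggregation over the even- and odd-digit key groups (objective: alternative).

-- ===== PORT A =====
-- int(char) on a digit character is exactly its code minus 48 (hand-ported; exact since isdigit guarantees '0'..'9')
def count_even_odd (text : String) : Int × Int :=
  text.toList.foldl (fun (st : Int × Int) c =>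
    if PySem.Chars.isdigit c then
      let num : Int := (c.toNat : Int) - 48
      if PySem.Int.mod num 2 = 0 then (st.1 + 1, st.2) else (st.1, st.2 + 1)
    else st) (0, 0)

-- ===== PORT B =====
def count_even_odd_alt (text : String) : Int × Int :=
  let counts : PySem.Dict Char Int :=
    text.toList.foldl (fun d c => d.insert c (d.getD c 0 + 1)) PySem.Dict.empty
  let even_count : Int := ((String.toList "02468").map (fun d => counts.getD d 0)).sum
  let odd_count : Int := ((String.toList "13579").map (fun d => counts.getD d 0)).sum
  (even_count, odd_count)

-- ===== PRECONDITION & SPEC =====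
def Spec_count_even_odd (text : String) (out : Int × Int) : Prop := out = count_even_odd_alt text
instance (text : String) (out : Int × Int) : Decidable (Spec_count_even_odd text out) := by unfold Spec_count_even_odd; infer_instance

-- ===== CLAIM (what is proved, stated in full; the proofs are below) =====
def Claim_equal_count_even_odd : Prop := ∀ (text : String), Dom_count_even_odd text → Spec_count_even_odd text (count_even_odd text)

-- ===== LEMMAS AND PROOFS =====

-- sum of the multiplicities of the key group E in l
def pvSum (E : List Char) (l : List Char) : Int := (E.map (fun d => (l.count d : Int))).sum

lemma pvSum_cons (E : List Char) (hE : E.Nodup) (c : Char) (l : List Char) :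
    pvSum E (c :: l) = pvSum E l + (if c ∈ E then 1 else 0) := by
  induction E with
  | nil => simp [pvSum]
  | cons e E ih =>
    obtain ⟨he, hE'⟩ := List.nodup_cons.mp hE
    have hrec := ih hE'
    simp only [pvSum, List.map_cons, List.sum_cons] at hrec ⊢
    rw [hrec, List.count_cons]
    by_cases h : c = e
    · subst h
      simp [he]
      ring
    · simp [h, List.mem_cons]
      split_ifs <;> ring

lemma char_eq_iff (c d : Char) : c = d ↔ c.toNat = d.toNat :=
  ⟨fun h => by rw [h], fun h => Char.ext (UInt32.toNat_inj.mp h)⟩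

lemma even_mem (c : Char) :
    (PySem.Chars.isdigit c = true ∧ PySem.Int.mod ((c.toNat : Int) - 48) 2 = 0) ↔
      c ∈ String.toList "02468" := by
  rw [show String.toList "02468" = ['0','2','4','6','8'] from rfl]
  simp only [PySem.Chars.isdigit, Bool.and_eq_true, decide_eq_true_eq,
    Char.le_def, UInt32.le_iff_toNat_le, List.mem_cons, List.not_mem_nil, or_false,
    char_eq_iff, PySem.Int.mod, Int.fmod_eq_emod,
    show ((0:Int) ≤ 2 ∨ (2:Int) ∣ (c.toNat:Int) - 48) from Or.inl (by norm_num), if_pos, add_zero]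
  rw [show '0'.val.toNat = 48 from rfl, show '9'.val.toNat = 57 from rfl,
    show '0'.toNat = 48 from rfl, show '2'.toNat = 50 from rfl, show '4'.toNat = 52 from rfl,
    show '6'.toNat = 54 from rfl, show '8'.toNat = 56 from rfl,
    show c.val.toNat = c.toNat from rfl]
  omega

lemma odd_mem (c : Char) :
    (PySem.Chars.isdigit c = true ∧ ¬ PySem.Int.mod ((c.toNat : Int) - 48) 2 = 0) ↔
      c ∈ String.toList "13579" := by
  rw [show String.toList "13579" = ['1','3','5','7','9'] from rfl]
  simp only [PySem.Chars.isdigit, Bool.and_eq_true, decide_eq_true_eq,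
    Char.le_def, UInt32.le_iff_toNat_le, List.mem_cons, List.not_mem_nil, or_false,
    char_eq_iff, PySem.Int.mod, Int.fmod_eq_emod,
    show ((0:Int) ≤ 2 ∨ (2:Int) ∣ (c.toNat:Int) - 48) from Or.inl (by norm_num), if_pos, add_zero]
  rw [show '0'.val.toNat = 48 from rfl, show '9'.val.toNat = 57 from rfl,
    show '1'.toNat = 49 from rfl, show '3'.toNat = 51 from rfl, show '5'.toNat = 53 from rfl,
    show '7'.toNat = 55 from rfl, show '9'.toNat = 57 from rfl,
    show c.val.toNat = c.toNat from rfl]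
  omega

lemma loop_eq (l : List Char) (e o : Int) :
    l.foldl (fun (st : Int × Int) c =>
      if PySem.Chars.isdigit c then
        let num : Int := (c.toNat : Int) - 48
        if PySem.Int.mod num 2 = 0 then (st.1 + 1, st.2) else (st.1, st.2 + 1)
      else st) (e, o) =
    (e + pvSum (String.toList "02468") l, o + pvSum (String.toList "13579") l) := by
  induction l generalizing e o with
  | nil => simp [pvSum]
  | cons c l ih =>
    rw [List.foldl_cons]
    have hE : (String.toList "02468").Nodup := by decide
    have hO : (String.toList "13579").Nodup := by decide
    by_cases hd : PySem.Chars.isdigit c = true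
    · by_cases hm : PySem.Int.mod ((c.toNat : Int) - 48) 2 = 0
      · have hcE : c ∈ String.toList "02468" := (even_mem c).mp ⟨hd, hm⟩
        have hcO : c ∉ String.toList "13579" := fun h => ((odd_mem c).mpr h).2 hm
        simp only [hd, hm, if_pos]
        rw [ih, pvSum_cons _ hE, pvSum_cons _ hO, if_pos hcE, if_neg hcO]
        simp only [Prod.mk.injEq]
        constructor <;> ring
      · have hcE : c ∉ String.toList "02468" := fun h => hm ((even_mem c).mpr h).2
        have hcO : c ∈ String.toList "13579" := (odd_mem c).mp ⟨hd, hm⟩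
        simp only [hd, if_true, hm, if_false]
        rw [ih, pvSum_cons _ hE, pvSum_cons _ hO, if_neg hcE, if_pos hcO]
        simp only [Prod.mk.injEq]
        constructor <;> ring
    · have hcE : c ∉ String.toList "02468" := fun h => hd ((even_mem c).mpr h).1
      have hcO : c ∉ String.toList "13579" := fun h => hd ((odd_mem c).mpr h).1
      simp only [hd, if_false, Bool.false_eq_true]
      rw [ih, pvSum_cons _ hE, pvSum_cons _ hO, if_neg hcE, if_neg hcO]
      simp

lemma alt_eq (text : String) :
    count_even_odd_alt text =
      (pvSum (String.toList "02468") text.toList, pvSum (String.toList "13579") text.toList) := by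
  unfold count_even_odd_alt pvSum
  simp [PySem.Dict.getD_foldl_insert_add_one, PySem.Dict.getD_empty]

-- ===== VERDICT (by name: the statement is the Claim_ definition above) =====
theorem count_even_odd_spec : Claim_equal_count_even_odd := by
  intro text _
  unfold Spec_count_even_odd count_even_odd
  rw [loop_eq, alt_eq]
  simp
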